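-- pv_equiv track=rewrite | github.com/NetherNova/event-kge | prep/etl.py | binary_sequences
-- ===== SOURCE A (Python) =====
-- def binary_sequences(sequences, index, unique_dict, classification_event=None):
--     train = []
--     labels = []
--     for i, seq in enumerate(sequences):
--         local_entities = [event[index] for event in seq]
--         x = 0
--         hit = False
--         if classification_event:
--             for j, m in enumerate(local_entities):
--                 # what if multiple matches?
--                 if m == classification_event:
--                     train.append(' '.join([str(unique_dict[msg]) for msg in local_entities[x:j]]))
--                     labels.append(1)
--                     x = j + 1
--                     hit = True
--         if not hit:
--             # append indices of entities as strings (needed for tf.VocabProcessor)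
--             train.append(' '.join([str(unique_dict[entity]) for entity in local_entities]))
--             labels.append(0)
--     return train, labels
-- ===== SOURCE B (Python) =====
-- def binary_sequences(sequences, index, unique_dict, classification_event=None):
--     train = []
--     labels = []
--     for seq in sequences:
--         local_entities = [event[index] for event in seq]
--         # partition into groups split at classification_event occurrences
--         groups = []
--         current = []
--         for m in local_entities:
--             if m == classification_event:
--                 groups.append(current)
--                 current = []
--             else:
--                 current.append(m)
--         groups.append(current)
--         if classification_event and len(groups) > 1:
--             for g in groups[:-1]:
--                 train.append(' '.join(str(unique_dict[e]) for e in g))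
--                 labels.append(1)
--         else:
--             train.append(' '.join(str(unique_dict[e]) for e in local_entities))
--             labels.append(0)
--     return train, labels
-- ===== Notes on version B (the rewrite author's own statement) =====
-- stated objective: simpler
-- what changed: B replaces A's index/hit-flag bookkeeping with inline slicing by an explicit partition of each sequence into groups split at classification_event, emitting every group but the last with label 1 (or the whole joined sequence with label 0 when no split applies).
-- outside the precondition, e.g. on binary_sequences([[['a'], ['X'], ['b']]], 0, {'a': 1}, 'X'): A returns (['1'], [1]), B returns (['1'], [1])
import Mathlib
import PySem

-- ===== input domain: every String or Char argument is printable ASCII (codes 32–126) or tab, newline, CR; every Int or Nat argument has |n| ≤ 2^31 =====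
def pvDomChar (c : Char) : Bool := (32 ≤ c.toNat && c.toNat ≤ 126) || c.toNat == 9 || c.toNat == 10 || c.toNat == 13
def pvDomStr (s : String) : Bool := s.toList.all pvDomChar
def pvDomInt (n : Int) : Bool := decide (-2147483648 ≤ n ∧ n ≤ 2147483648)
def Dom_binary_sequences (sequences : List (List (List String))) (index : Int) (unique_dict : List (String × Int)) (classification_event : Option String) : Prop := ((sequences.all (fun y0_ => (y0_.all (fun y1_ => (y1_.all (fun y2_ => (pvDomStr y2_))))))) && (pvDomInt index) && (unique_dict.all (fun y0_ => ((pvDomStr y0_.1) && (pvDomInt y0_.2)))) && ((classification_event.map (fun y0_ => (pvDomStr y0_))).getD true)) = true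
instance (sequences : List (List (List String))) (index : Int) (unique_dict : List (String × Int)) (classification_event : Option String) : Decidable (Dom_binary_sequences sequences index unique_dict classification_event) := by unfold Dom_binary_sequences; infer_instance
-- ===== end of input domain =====

-- B replaces A's running-index/hit-flag slicing with an explicit partition of each sequence into
-- groups split at classification_event; same return value, simpler decomposition (objective: simpler).

-- shared faithful renderings of Python's event[index] and str(unique_dict[k])
def pvEnt (index : Int) (ev : List String) : String := PySem.List.pyGetD ev index ""
def pvLook (unique_dict : List (String × Int)) (s : String) : String :=
  PySem.Int.toStr (((unique_dict.find? (fun p => p.1 == s)).map (·.2)).getD 0)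
-- Python truthiness of the classification_event argument (None and "" are falsy)
def pvTruthy (classification_event : Option String) : Bool :=
  match classification_event with
  | some c => c ≠ ""
  | none => false

-- ===== PORT A =====
def binary_sequences (sequences : List (List (List String))) (index : Int) (unique_dict : List (String × Int)) (classification_event : Option String) : List String × List Int :=
  (PySem.List.enumerate sequences 0).foldl
    (fun (st : List String × List Int) iseq =>
      let local_entities := iseq.2.map (pvEnt index)
      let st2 : List String × List Int × Int × Bool :=
        if pvTruthy classification_event then
          (PySem.List.enumerate local_entities 0).foldl
            (fun (s : List String × List Int × Int × Bool) jm =>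
              if some jm.2 = classification_event then
                (s.1 ++ [PySem.Str.join " " ((PySem.List.slice local_entities (some s.2.2.1) (some jm.1)).map (pvLook unique_dict))],
                 s.2.1 ++ [(1 : Int)], jm.1 + 1, true)
              else s)
            (st.1, st.2, (0 : Int), false)
        else (st.1, st.2, (0 : Int), false)
      if st2.2.2.2 = false then
        (st2.1 ++ [PySem.Str.join " " (local_entities.map (pvLook unique_dict))], st2.2.1 ++ [(0 : Int)])
      else (st2.1, st2.2.1))
    ([], [])

-- ===== PORT B =====
def binary_sequences_alt (sequences : List (List (List String))) (index : Int) (unique_dict : List (String × Int)) (classification_event : Option String) : List String × List Int :=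
  sequences.foldl
    (fun (st : List String × List Int) seq =>
      let local_entities := seq.map (pvEnt index)
      let gc : List (List String) × List String :=
        local_entities.foldl
          (fun (g : List (List String) × List String) m =>
            if some m = classification_event then (g.1 ++ [g.2], [])
            else (g.1, g.2 ++ [m]))
          ([], [])
      let groups := gc.1 ++ [gc.2]
      if pvTruthy classification_event ∧ groups.length > 1 then
        (PySem.List.slice groups none (some (-1))).foldl
          (fun (st2 : List String × List Int) g =>
            (st2.1 ++ [PySem.Str.join " " (g.map (pvLook unique_dict))], st2.2 ++ [(1 : Int)]))
          st
      else
        (st.1 ++ [PySem.Str.join " " (local_entities.map (pvLook unique_dict))], st.2 ++ [(0 : Int)]))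
    ([], [])

-- ===== PRECONDITION & SPEC =====
-- Pre_ excludes exactly the inputs on which Python A raises (IndexError on event[index], KeyError
-- on unique_dict[entity]); it is slightly narrower than necessary in ONE respect, stated here:
-- entities of the trailing group after the last classification_event match are never looked up by
-- A, yet Pre_ requires every non-separator entity to be a dict key (see claim.json "cites").
def Pre_binary_sequences (sequences : List (List (List String))) (index : Int) (unique_dict : List (String × Int)) (classification_event : Option String) : Prop :=
  ∀ seq ∈ sequences, ∀ ev ∈ seq,
    PySem.Raise.InRange ev.length index ∧
    ((pvTruthy classification_event = true ∧ classification_event = some (pvEnt index ev)) ∨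
      pvEnt index ev ∈ unique_dict.map (·.1))
instance (sequences : List (List (List String))) (index : Int) (unique_dict : List (String × Int)) (classification_event : Option String) : Decidable (Pre_binary_sequences sequences index unique_dict classification_event) := by unfold Pre_binary_sequences; infer_instance

def pvWitness_binary_sequences : List (List (List String)) × Int × (List (String × Int)) × Option String :=
  ([[["a"], ["X"], ["b"]], [["b"]]], 0, [("a", 1), ("b", 2)], some "X")

def Spec_binary_sequences (sequences : List (List (List String))) (index : Int) (unique_dict : List (String × Int)) (classification_event : Option String) (out : List String × List Int) : Prop := out = binary_sequences_alt sequences index unique_dict classification_event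
instance (sequences : List (List (List String))) (index : Int) (unique_dict : List (String × Int)) (classification_event : Option String) (out : List String × List Int) : Decidable (Spec_binary_sequences sequences index unique_dict classification_event out) := by unfold Spec_binary_sequences; infer_instance

-- ===== CLAIM (what is proved, stated in full; the proofs are below) =====
def Claim_equal_binary_sequences : Prop := ∀ (sequences : List (List (List String))) (index : Int) (unique_dict : List (String × Int)) (classification_event : Option String), Dom_binary_sequences sequences index unique_dict classification_event → Pre_binary_sequences sequences index unique_dict classification_event → Spec_binary_sequences sequences index unique_dict classification_event (binary_sequences sequences index unique_dict classification_event)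

-- ===== LEMMAS AND PROOFS =====
def pvSegs (ce : Option String) : List String → List (List String) × List String
  | [] => ([], [])
  | m :: r =>
    if some m = ce then ([] :: (pvSegs ce r).1, (pvSegs ce r).2)
    else
      match pvSegs ce r with
      | ([], c) => ([], m :: c)
      | (g :: gs, c) => ((m :: g) :: gs, c)

theorem pvSegs_nil_snd (ce : Option String) (l : List String)
    (h : (pvSegs ce l).1 = []) : (pvSegs ce l).2 = l := by
  induction l with
  | nil => rfl
  | cons m r ih =>
    by_cases hm : some m = ce
    · simp [pvSegs, hm] at h
    · rcases hseg : pvSegs ce r with ⟨_ | ⟨g, gs⟩, c⟩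
      · have hc : c = r := by have := ih (by rw [hseg]); rwa [hseg] at this
        simp [pvSegs, hm, hseg, hc]
      · simp [pvSegs, hm, hseg] at h

theorem pvB_inner (ce : Option String) (l : List String) :
    ∀ (gs : List (List String)) (cur : List String),
      l.foldl (fun (g : List (List String) × List String) m =>
          if some m = ce then (g.1 ++ [g.2], []) else (g.1, g.2 ++ [m])) (gs, cur) =
        (match pvSegs ce l with
         | ([], c) => (gs, cur ++ c)
         | (s :: ss, c) => (gs ++ (cur ++ s) :: ss, c)) := by
  induction l with
  | nil => intro gs cur; simp [pvSegs]
  | cons m r ih =>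
    intro gs cur
    simp only [List.foldl_cons]
    by_cases hm : some m = ce
    · rw [if_pos hm, ih]
      rcases hseg : pvSegs ce r with ⟨_ | ⟨s, ss⟩, c⟩ <;>
        simp [pvSegs, hm, hseg]
    · rw [if_neg hm, ih]
      rcases hseg : pvSegs ce r with ⟨_ | ⟨s, ss⟩, c⟩ <;>
        simp [pvSegs, hm, hseg]


theorem pvB_emit (ud : List (String × Int)) (l : List (List String)) :
    ∀ (st : List String × List Int),
      l.foldl (fun (st2 : List String × List Int) g =>
          (st2.1 ++ [PySem.Str.join " " (g.map (pvLook ud))], st2.2 ++ [(1 : Int)])) st =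
        (st.1 ++ l.map (fun g => PySem.Str.join " " (g.map (pvLook ud))),
         st.2 ++ List.replicate l.length 1) := by
  induction l with
  | nil => intro st; simp
  | cons g r ih =>
    intro st
    simp only [List.foldl_cons, ih, List.map_cons, List.length_cons, List.replicate_succ]
    simp

theorem pv_slice_succ (F : List String) (x p : Nat) (m : String) (r : List String)
    (hx : x ≤ p) (hd : F.drop p = m :: r) :
    PySem.List.slice F (some ((x : Nat) : Int)) (some (((p + 1 : Nat)) : Int)) =
      PySem.List.slice F (some (x : Int)) (some (p : Int)) ++ [m] := by
  rw [PySem.List.slice_natCast, PySem.List.slice_natCast]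
  have h1 : p + 1 - x = (p - x) + 1 := by omega
  rw [h1, List.take_add_one]
  congr 1
  have hFp : F[p]? = some m := by
    have h0 : (List.drop p F)[0]? = F[p+0]? := List.getElem?_drop
    rw [hd] at h0
    simpa using h0.symm
  have : (F.drop x)[p - x]? = some m := by
    rw [List.getElem?_drop]
    have hx2 : x + (p - x) = p := by omega
    rw [hx2, hFp]
  simp [this]

theorem pv_slice_refl (F : List String) (n : Nat) :
    PySem.List.slice F (some ((n : Nat) : Int)) (some ((n : Nat) : Int)) = [] := by
  rw [PySem.List.slice_natCast]
  simp

theorem pvA_inner (ce : Option String) (ud : List (String × Int)) (F : List String) :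
    ∀ (l : List String) (p x : Nat) (tr : List String) (lb : List Int) (hit : Bool),
      F.drop p = l → x ≤ p →
      (PySem.List.enumerate l (p : Int)).foldl
        (fun (s : List String × List Int × Int × Bool) jm =>
          if some jm.2 = ce then
            (s.1 ++ [PySem.Str.join " " ((PySem.List.slice F (some s.2.2.1) (some jm.1)).map (pvLook ud))],
             s.2.1 ++ [(1 : Int)], jm.1 + 1, true)
          else s)
        (tr, lb, (x : Int), hit) =
      (match pvSegs ce l with
       | ([], _) => (tr, lb, (x : Int), hit)
       | (s :: ss, c) =>
         (tr ++ ((PySem.List.slice F (some (x : Int)) (some (p : Int)) ++ s) :: ss).map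
             (fun g => PySem.Str.join " " (g.map (pvLook ud))),
          lb ++ List.replicate (ss.length + 1) 1,
          ((F.length - c.length : Nat) : Int), true)) := by
  intro l
  induction l with
  | nil =>
    intro p x tr lb hit hdrop hx
    simp [PySem.List.enumerate_nil, pvSegs]
  | cons m r ih =>
    intro p x tr lb hit hdrop hx
    have hdrop' : F.drop (p + 1) = r := by
      have h1 : List.drop 1 (List.drop p F) = List.drop (p + 1) F := List.drop_drop
      rw [hdrop] at h1
      simpa using h1.symm
    have hlenr : r.length = F.length - (p + 1) := by
      have := congrArg List.length hdrop'
      simpa using this.symm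
    have hplt : p < F.length := by
      have := congrArg List.length hdrop
      simp at this
      omega
    have hcast : (p : Int) + 1 = ((p + 1 : Nat) : Int) := by push_cast; ring
    rw [PySem.List.enumerate_cons, List.foldl_cons]
    by_cases hm : some m = ce
    · rw [if_pos hm]
      rw [hcast, ih (p + 1) (p + 1) _ _ true hdrop' (le_refl _)]
      rcases hseg : pvSegs ce r with ⟨_ | ⟨s, ss⟩, c⟩
      · have hc : c = r := by
          have := pvSegs_nil_snd ce r (by rw [hseg]); rwa [hseg] at this
        simp only [pvSegs, if_pos hm, hseg]
        simp [hc, List.replicate_succ]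
        omega
      · simp only [pvSegs, if_pos hm, hseg]
        rw [pv_slice_refl]
        simp [List.replicate_succ]
    · rw [if_neg hm]
      rw [hcast, ih (p + 1) x _ _ hit hdrop' (by omega)]
      rcases hseg : pvSegs ce r with ⟨_ | ⟨s, ss⟩, c⟩
      · simp only [pvSegs, if_neg hm, hseg]
      · simp only [pvSegs, if_neg hm, hseg]
        rw [pv_slice_succ F x p m r hx hdrop]
        simp


theorem pv_body (ud : List (String × Int)) (ce : Option String) (les : List String)
    (st : List String × List Int) :
    (let st2 : List String × List Int × Int × Bool :=
        if pvTruthy ce then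
          (PySem.List.enumerate les 0).foldl
            (fun (s : List String × List Int × Int × Bool) jm =>
              if some jm.2 = ce then
                (s.1 ++ [PySem.Str.join " " ((PySem.List.slice les (some s.2.2.1) (some jm.1)).map (pvLook ud))],
                 s.2.1 ++ [(1 : Int)], jm.1 + 1, true)
              else s)
            (st.1, st.2, (0 : Int), false)
        else (st.1, st.2, (0 : Int), false)
      if st2.2.2.2 = false then
        (st2.1 ++ [PySem.Str.join " " (les.map (pvLook ud))], st2.2.1 ++ [(0 : Int)])
      else (st2.1, st2.2.1)) =
    (let gc : List (List String) × List String :=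
        les.foldl (fun (g : List (List String) × List String) m =>
            if some m = ce then (g.1 ++ [g.2], []) else (g.1, g.2 ++ [m])) ([], [])
      let groups := gc.1 ++ [gc.2]
      if pvTruthy ce ∧ groups.length > 1 then
        (PySem.List.slice groups none (some (-1))).foldl
          (fun (st2 : List String × List Int) g =>
            (st2.1 ++ [PySem.Str.join " " (g.map (pvLook ud))], st2.2 ++ [(1 : Int)])) st
      else (st.1 ++ [PySem.Str.join " " (les.map (pvLook ud))], st.2 ++ [(0 : Int)])) := by
  simp only [pvB_inner]
  cases ht : pvTruthy ce with
  | false =>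
    simp
  | true =>
    have h0 : ((0 : Nat) : Int) = 0 := by simp
    have hA := pvA_inner ce ud les les 0 0 st.1 st.2 false List.drop_zero (le_refl 0)
    rw [h0] at hA
    rcases hseg : pvSegs ce les with ⟨_ | ⟨s, ss⟩, c⟩
    · have hc : c = les := by
        have := pvSegs_nil_snd ce les (by rw [hseg]); rwa [hseg] at this
      rw [hseg] at hA
      simp only [hA]
      simp
    · rw [hseg] at hA
      have hsl : PySem.List.slice les (some (0 : Int)) (some (0 : Int)) = [] := by
        have := pv_slice_refl les 0
        rwa [h0] at this
      rw [hsl] at hA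
      simp only [hA]
      simp only [if_true, List.nil_append]
      rw [PySem.List.slice_to_neg_one, List.dropLast_concat, pvB_emit]
      have hlen : ((s :: ss) ++ [c]).length > 1 := by
        simp only [List.length_append, List.length_cons, List.length_nil]
        omega
      simp [List.replicate_succ]


theorem pv_outer (index : Int) (ud : List (String × Int)) (ce : Option String) :
    ∀ (seqs : List (List (List String))) (s : Int) (st : List String × List Int),
      (PySem.List.enumerate seqs s).foldl
        (fun (st : List String × List Int) iseq =>
          let local_entities := iseq.2.map (pvEnt index)
          let st2 : List String × List Int × Int × Bool :=
            if pvTruthy ce then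
              (PySem.List.enumerate local_entities 0).foldl
                (fun (s : List String × List Int × Int × Bool) jm =>
                  if some jm.2 = ce then
                    (s.1 ++ [PySem.Str.join " " ((PySem.List.slice local_entities (some s.2.2.1) (some jm.1)).map (pvLook ud))],
                     s.2.1 ++ [(1 : Int)], jm.1 + 1, true)
                  else s)
                (st.1, st.2, (0 : Int), false)
            else (st.1, st.2, (0 : Int), false)
          if st2.2.2.2 = false then
            (st2.1 ++ [PySem.Str.join " " (local_entities.map (pvLook ud))], st2.2.1 ++ [(0 : Int)])
          else (st2.1, st2.2.1)) st =
      seqs.foldl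
        (fun (st : List String × List Int) seq =>
          let local_entities := seq.map (pvEnt index)
          let gc : List (List String) × List String :=
            local_entities.foldl
              (fun (g : List (List String) × List String) m =>
                if some m = ce then (g.1 ++ [g.2], []) else (g.1, g.2 ++ [m]))
              ([], [])
          let groups := gc.1 ++ [gc.2]
          if pvTruthy ce ∧ groups.length > 1 then
            (PySem.List.slice groups none (some (-1))).foldl
              (fun (st2 : List String × List Int) g =>
                (st2.1 ++ [PySem.Str.join " " (g.map (pvLook ud))], st2.2 ++ [(1 : Int)]))
              st
          else
            (st.1 ++ [PySem.Str.join " " (local_entities.map (pvLook ud))], st.2 ++ [(0 : Int)])) st := by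
  intro seqs
  induction seqs with
  | nil => intro s st; simp [PySem.List.enumerate_nil]
  | cons seq rest ih =>
    intro s st
    rw [PySem.List.enumerate_cons, List.foldl_cons, List.foldl_cons, ih]
    congr 1
    exact pv_body ud ce (seq.map (pvEnt index)) st

-- ===== VERDICT (by name: the statement is the Claim_ definition above) =====
theorem binary_sequences_spec : Claim_equal_binary_sequences := by
  intro sequences index unique_dict classification_event _ _
  show binary_sequences sequences index unique_dict classification_event = _
  unfold binary_sequences binary_sequences_alt
  exact pv_outer index unique_dict classification_event sequences 0 ([], [])
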